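-- pv_equiv track=rewrite | github.com/weinbusch/advent-of-code | aoc2022/day20.py | mix_numbers
-- ===== SOURCE A (Python) =====
-- def mix_numbers(numbers, repetitions=1):
--     k = len(numbers)
--     tuples = list(enumerate(numbers))
--     a = tuples.copy()
--     for _ in range(repetitions):
--         for t in tuples:
--             x = a.index(t)
--             (_, dx) = a.pop(x)
--             y = (x + dx) % (k - 1)
--             a.insert(y, t)
--     result = [n for _, n in a]
--     return result
-- ===== SOURCE B (Python) =====
-- def mix_numbers(numbers, repetitions=1):
--     # Works on the inverse permutation: pos[i] = current index of original element i.
--     # A move is pure arithmetic on pos (shift the affected band by +-1), no list surgery.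
--     k = len(numbers)
--     pos = list(range(k))
--     for _ in range(repetitions):
--         for i in range(k):
--             x = pos[i]
--             y = (x + numbers[i]) % (k - 1)
--             if y > x:
--                 pos = [p - 1 if x < p <= y else p for p in pos]
--             elif y < x:
--                 pos = [p + 1 if y <= p < x else p for p in pos]
--             pos[i] = y
--     out = [0] * k
--     for i in range(k):
--         out[pos[i]] = numbers[i]
--     return out
-- ===== Notes on version B (the rewrite author's own statement) =====
-- stated objective: alternative
-- what changed: B replaces A's list-of-tuples surgery (a.index scan, pop, insert each move) by pure arithmetic on the inverse permutation: a position table pos[i] is shifted by +-1 on the affected band per move and the result is scattered out[pos[i]] = numbers[i] at the end.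
import Mathlib
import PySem

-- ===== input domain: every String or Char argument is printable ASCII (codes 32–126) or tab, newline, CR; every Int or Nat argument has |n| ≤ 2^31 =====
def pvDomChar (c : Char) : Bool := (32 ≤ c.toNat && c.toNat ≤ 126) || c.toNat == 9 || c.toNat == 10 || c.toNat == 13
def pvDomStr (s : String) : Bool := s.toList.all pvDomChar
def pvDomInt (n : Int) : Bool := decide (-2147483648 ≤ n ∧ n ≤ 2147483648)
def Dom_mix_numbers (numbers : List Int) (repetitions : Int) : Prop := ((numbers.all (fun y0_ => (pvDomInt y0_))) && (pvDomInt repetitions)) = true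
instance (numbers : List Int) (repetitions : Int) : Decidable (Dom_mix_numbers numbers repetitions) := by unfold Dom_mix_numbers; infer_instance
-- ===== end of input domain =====

-- B replaces A's list surgery (index/pop/insert) by arithmetic on the inverse permutation (alternative, not faster).

-- ===== PORT A =====
-- one move of A's inner loop: x = a.index(t); (_, dx) = a.pop(x); y = (x+dx)%(k-1); a.insert(y, t)
def pvStepA (k : Int) (a : List (Int × Int)) (t : Int × Int) : List (Int × Int) :=
  match PySem.List.index? a t with
  | none => a        -- Python: ValueError (unreachable: t is always in a)
  | some x =>
    match PySem.List.pop? a (x : Int) with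
    | none => a      -- Python: IndexError (unreachable)
    | some (pr, a1) =>
      PySem.List.insert a1 (PySem.Int.mod ((x : Int) + pr.2) (k - 1)) t

def mix_numbers (numbers : List Int) (repetitions : Int) : List Int :=
  let k : Int := (numbers.length : Int)
  let tuples := PySem.List.enumerate numbers
  let a := (PySem.List.pyRange 0 repetitions 1).foldl
    (fun a _ => tuples.foldl (pvStepA k) a) tuples
  a.map (fun p => p.2)

-- ===== PORT B =====
-- one move of B's inner loop: shift the band of positions between x and y by ±1, then pos[i] = y
def pvStepB (numbers : List Int) (pos : List Int) (i : Int) : List Int :=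
  let k : Int := (numbers.length : Int)
  let x := PySem.List.pyGetD pos i 0
  let y := PySem.Int.mod (x + PySem.List.pyGetD numbers i 0) (k - 1)
  let pos1 :=
    if x < y then pos.map (fun p => if x < p ∧ p ≤ y then p - 1 else p)
    else if y < x then pos.map (fun p => if y ≤ p ∧ p < x then p + 1 else p)
    else pos
  PySem.List.pySetD pos1 i y

def mix_numbers_alt (numbers : List Int) (repetitions : Int) : List Int :=
  let k : Int := (numbers.length : Int)
  let pos := (PySem.List.pyRange 0 repetitions 1).foldl
    (fun pos _ => (PySem.List.pyRange 0 k 1).foldl (pvStepB numbers) pos)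
    (PySem.List.pyRange 0 k 1)
  (PySem.List.pyRange 0 k 1).foldl
    (fun out i => PySem.List.pySetD out (PySem.List.pyGetD pos i 0) (PySem.List.pyGetD numbers i 0))
    (List.replicate numbers.length 0)

-- ===== PRECONDITION & SPEC =====
-- Pre_ excludes exactly the inputs where Python A raises ZeroDivisionError ('% (k-1)' with k = 1);
-- B's Python raises there too.
def Pre_mix_numbers (numbers : List Int) (repetitions : Int) : Prop :=
  ¬ (numbers.length = 1 ∧ 1 ≤ repetitions)
instance (numbers : List Int) (repetitions : Int) : Decidable (Pre_mix_numbers numbers repetitions) := by unfold Pre_mix_numbers; infer_instance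
def pvWitness_mix_numbers : List Int × Int := ([3, 1, 0, -2, 4], 2)

def Spec_mix_numbers (numbers : List Int) (repetitions : Int) (out : List Int) : Prop := out = mix_numbers_alt numbers repetitions
instance (numbers : List Int) (repetitions : Int) (out : List Int) : Decidable (Spec_mix_numbers numbers repetitions out) := by unfold Spec_mix_numbers; infer_instance

-- ===== CLAIM (what is proved, stated in full; the proofs are below) =====
def Claim_equal_mix_numbers : Prop := ∀ (numbers : List Int) (repetitions : Int), Dom_mix_numbers numbers repetitions → Pre_mix_numbers numbers repetitions → Spec_mix_numbers numbers repetitions (mix_numbers numbers repetitions)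

-- ===== LEMMAS AND PROOFS =====

-- Invariant tying A's list of tuples to B's inverse-permutation table:
-- P i is the current index of original element i in a, pos stores it, and a holds (i, numbers[i]) there.
def pvInv (nums : List Int) (a : List (Int × Int)) (pos : List Int) : Prop :=
  ∃ P : Nat → Nat,
    a.length = nums.length ∧ pos.length = nums.length ∧
    ∀ i : Nat, i < nums.length →
      P i < nums.length ∧ pos[i]? = some ((P i : Nat) : Int) ∧
      a[P i]? = some (((i : Nat) : Int), nums.getD i 0)

theorem pvSurj (k : Nat) (P : Nat → Nat) (hr : ∀ i, i < k → P i < k)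
    (hinj : ∀ i j, i < k → j < k → P i = P j → i = j) :
    ∀ q, q < k → ∃ i, i < k ∧ P i = q := by
  intro q hq
  have hF : Function.Injective (fun i : Fin k => (⟨P i, hr i i.2⟩ : Fin k)) := by
    intro ⟨x, hx⟩ ⟨y, hy⟩ h
    simp only [Fin.mk.injEq] at h
    exact Fin.ext (hinj x y hx hy h)
  obtain ⟨⟨j, hj⟩, he⟩ := Finite.injective_iff_surjective.mp hF ⟨q, hq⟩
  exact ⟨j, hj, by simpa using congrArg Fin.val he⟩

theorem pvGetMid {α : Type} (xs ys : List α) (t : α) (r : Nat) :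
    (xs ++ t :: ys)[r]? =
      if r < xs.length then xs[r]?
      else if r = xs.length then some t
      else ys[r - xs.length - 1]? := by
  split_ifs with h1 h2
  · exact List.getElem?_append_left h1
  · subst h2; simp
  · rw [List.getElem?_append_right (by omega), List.getElem?_cons, if_neg (by omega)]

theorem pvFoldl_rel {α β γ : Type} (R : α → β → Prop) (f : α → γ → α) (g : β → γ → β) :
    ∀ (l : List γ) (a : α) (b : β), R a b →
      (∀ c ∈ l, ∀ a b, R a b → R (f a c) (g b c)) →
      R (l.foldl f a) (l.foldl g b) := by
  intro l
  induction l with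
  | nil => intro a b h _; exact h
  | cons c l ih =>
    intro a b h hstep
    exact ih _ _ (hstep c (by simp) a b h) (fun c' hc' => hstep c' (by simp [hc']))

theorem pvInv_init (nums : List Int) :
    pvInv nums (PySem.List.enumerate nums) (PySem.List.pyRange 0 (nums.length : Int) 1) := by
  refine ⟨fun i => i, by simp [PySem.List.length_enumerate], by simp [PySem.List.length_pyRange_one], ?_⟩
  intro i hi
  refine ⟨hi, ?_, ?_⟩
  · rw [PySem.List.getElem?_pyRange_one]
    simp [hi]
  · rw [PySem.List.getElem?_enumerate]
    simp [List.getD_eq_getElem?_getD, List.getElem?_eq_getElem hi]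

theorem pvStep_preserves (nums : List Int) (hk : nums.length ≠ 1) (a : List (Int × Int))
    (pos : List Int) (i : Nat) (hi : i < nums.length) (h : pvInv nums a pos) :
    pvInv nums (pvStepA (nums.length : Int) a (((i : Nat) : Int), nums.getD i 0))
      (pvStepB nums pos ((i : Nat) : Int)) := by
  obtain ⟨P, hla, hlp, hP⟩ := h
  have hk2 : 2 ≤ nums.length := by omega
  obtain ⟨hPi, hposi, hai⟩ := hP i hi
  have hinj : ∀ j1 j2, j1 < nums.length → j2 < nums.length → P j1 = P j2 → j1 = j2 := by
    intro j1 j2 h1 h2 he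
    have a1 := (hP j1 h1).2.2
    have a2 := (hP j2 h2).2.2
    rw [he, a2] at a1
    have : ((j2 : Nat) : Int) = ((j1 : Nat) : Int) := by
      simpa using congrArg (fun o => (o.map Prod.fst)) a1
    exact (by exact_mod_cast this : j2 = j1).symm
  have hsurj := pvSurj nums.length P (fun j hj => (hP j hj).1) hinj
  set t : Int × Int := (((i : Nat) : Int), nums.getD i 0) with ht
  set xn := P i with hxn
  have hxlen : xn < a.length := hla ▸ hPi
  have haxn : a[xn] = t := by
    obtain ⟨h1, h2⟩ := List.getElem?_eq_some_iff.mp hai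
    exact h2
  -- t occurs first at position xn
  have hfirst : ∀ q, q < xn → a[q]? ≠ some t := by
    intro q hq hcon
    obtain ⟨j, hj, hPj⟩ := hsurj q (hq.trans hPi)
    have h2 := (hP j hj).2.2
    rw [hPj, hcon] at h2
    have : ((i : Nat) : Int) = ((j : Nat) : Int) := by
      simpa [ht] using congrArg (fun o => (o.map Prod.fst)) h2
    have hij : i = j := by exact_mod_cast this
    subst hij
    omega
  have hidx : PySem.List.index? a t = some xn := by
    rw [PySem.List.index?_eq_some_iff]
    refine ⟨a.take xn, a.drop (xn + 1), ?_, by simp [List.length_take]; omega, ?_⟩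
    · conv_lhs => rw [← List.take_append_drop xn a]
      rw [← List.getElem_cons_drop hxlen, haxn]
    · intro hmem
      obtain ⟨q, hql, hqe⟩ := List.getElem_of_mem hmem
      have hq1 : q < xn := by simp [List.length_take] at hql; omega
      have : a[q]? = some t := by
        rw [List.getElem?_eq_getElem (by omega)]
        rw [← hqe, List.getElem_take]
      exact hfirst q hq1 this
  have hpop := PySem.List.pop?_natCast a xn hxlen
  have hm : 0 < (nums.length : Int) - 1 := by omega
  have hy0 := PySem.Int.mod_nonneg ((xn : Int) + nums.getD i 0) hm
  have hylt := PySem.Int.mod_lt ((xn : Int) + nums.getD i 0) hm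
  obtain ⟨yn, hyc⟩ : ∃ n : Nat,
      PySem.Int.mod ((xn : Int) + nums.getD i 0) ((nums.length : Int) - 1) = (n : Int) :=
    ⟨_, (Int.toNat_of_nonneg hy0).symm⟩
  have hynk : yn < nums.length - 1 := by rw [hyc] at hylt; omega
  have her : (a.eraseIdx xn).length = nums.length - 1 := by
    rw [List.length_eraseIdx, if_pos hxlen]; omega
  -- A-side step
  have hstepA : pvStepA (nums.length : Int) a t =
      (a.eraseIdx xn).take yn ++ t :: (a.eraseIdx xn).drop yn := by
    simp only [pvStepA, hidx, hpop, haxn]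
    have ht2 : t.2 = nums.getD i 0 := rfl
    rw [ht2, hyc, PySem.List.insert_natCast _ _ _ (by omega)]
  have hlen_take : ((a.eraseIdx xn).take yn).length = yn := by
    simp [her]; omega
  have hnewA : ∀ r : Nat,
      ((a.eraseIdx xn).take yn ++ t :: (a.eraseIdx xn).drop yn)[r]? =
        if r < yn then (a.eraseIdx xn)[r]?
        else if r = yn then some t
        else (a.eraseIdx xn)[r - 1]? := by
    intro r
    rw [pvGetMid, hlen_take]
    split_ifs with h1 h2
    · exact List.getElem?_take_of_lt h1
    · rfl
    · rw [List.getElem?_drop]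
      congr 1
      omega
  -- B-side step
  have hgx : PySem.List.pyGetD pos ((i : Nat) : Int) 0 = (xn : Int) := by
    rw [PySem.List.pyGetD_natCast]
    simp [List.getD_eq_getElem?_getD, hposi]
  have hgn : PySem.List.pyGetD nums ((i : Nat) : Int) 0 = nums.getD i 0 :=
    PySem.List.pyGetD_natCast nums i 0
  have hstepB : pvStepB nums pos ((i : Nat) : Int) =
      (if (xn : Int) < (yn : Int) then
          pos.map (fun p => if (xn : Int) < p ∧ p ≤ (yn : Int) then p - 1 else p)
        else if (yn : Int) < (xn : Int) then
          pos.map (fun p => if (yn : Int) ≤ p ∧ p < (xn : Int) then p + 1 else p)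
        else pos).set i ((yn : Int)) := by
    simp only [pvStepB, hgx, hgn, hyc]
    rw [PySem.List.pySetD_natCast]
  set Pn : Nat → Nat := fun j =>
    if j = i then yn
    else if xn < yn then (if xn < P j ∧ P j ≤ yn then P j - 1 else P j)
    else if yn < xn then (if yn ≤ P j ∧ P j < xn then P j + 1 else P j)
    else P j with hPn
  rw [hstepA, hstepB]
  have hlen1 : (if (xn : Int) < (yn : Int) then
      pos.map (fun p => if (xn : Int) < p ∧ p ≤ (yn : Int) then p - 1 else p)
    else if (yn : Int) < (xn : Int) then
      pos.map (fun p => if (yn : Int) ≤ p ∧ p < (xn : Int) then p + 1 else p)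
    else pos).length = nums.length := by
    split_ifs <;> simp [hlp]
  refine ⟨Pn, ?_, ?_, ?_⟩
  · simp [her]; omega
  · split_ifs <;> simp [hlp]
  · intro j hj
    obtain ⟨hPj, hposj, haj⟩ := hP j hj
    by_cases hji : j = i
    · subst hji
      refine ⟨by simp [hPn]; omega, ?_, ?_⟩
      · rw [List.getElem?_set, if_pos rfl, if_pos (by omega), hPn]
        simp
      · have : Pn j = yn := by simp [hPn]
        rw [this, hnewA, if_neg (by omega), if_pos rfl]
    · have hqx : P j ≠ xn := fun he => hji (hinj j i hj hi (by rw [he]))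
      refine ⟨by simp only [hPn]; split_ifs <;> omega, ?_, ?_⟩
      · -- pos component
        rw [List.getElem?_set, if_neg (by omega)]
        rcases Nat.lt_trichotomy xn yn with hxy | hxy | hxy
        · rw [if_pos (by exact_mod_cast hxy), List.getElem?_map, hposj]
          simp only [Option.map_some, Option.some.injEq, hPn, if_neg hji, if_pos hxy]
          split_ifs <;> omega
        · rw [if_neg (by omega), if_neg (by omega)]
          rw [hposj]
          simp only [Option.some.injEq, hPn, if_neg hji, hxy]
          simp
        · rw [if_neg (by exact_mod_cast Nat.lt_asymm hxy), if_pos (by exact_mod_cast hxy),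
            List.getElem?_map, hposj]
          simp only [Option.map_some, Option.some.injEq, hPn, if_neg hji,
            if_neg (by omega : ¬ xn < yn), if_pos hxy]
          split_ifs <;> omega
      · -- a component
        rw [hnewA]
        simp only [hPn, if_neg hji, List.getElem?_eraseIdx]
        split_ifs <;> first
          | (exfalso; omega)
          | (convert haj using 2 <;> omega)

theorem pvPass_preserves (nums : List Int) (hk : nums.length ≠ 1) (a : List (Int × Int))
    (pos : List Int) (h : pvInv nums a pos) :
    pvInv nums ((PySem.List.enumerate nums).foldl (pvStepA (nums.length : Int)) a)
      ((PySem.List.pyRange 0 (nums.length : Int) 1).foldl (pvStepB nums) pos) := by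
  rw [PySem.List.enumerate_eq_map_pyRange nums 0, PySem.List.len_eq, List.foldl_map]
  apply pvFoldl_rel (pvInv nums) _ _ _ _ _ h
  intro c hc a' pos' h'
  rw [PySem.List.mem_pyRange_one] at hc
  obtain ⟨j, rfl⟩ : ∃ j : Nat, c = (j : Int) := ⟨c.toNat, (Int.toNat_of_nonneg hc.1).symm⟩
  have hj : j < nums.length := by exact_mod_cast hc.2
  have hstep := pvStep_preserves nums hk a' pos' j hj h'
  simpa [PySem.List.pyGetD_natCast] using hstep

theorem pvFoldl_set_length (l : List (Nat × Int)) :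
    ∀ init : List Int, (l.foldl (fun o pq => o.set pq.1 pq.2) init).length = init.length := by
  induction l with
  | nil => intro init; rfl
  | cons hd tl ih => intro init; rw [List.foldl_cons, ih, List.length_set]

theorem pvFoldl_set_not_mem (l : List (Nat × Int)) (p : Nat) (hp : p ∉ l.map Prod.fst) :
    ∀ init : List Int, (l.foldl (fun o pq => o.set pq.1 pq.2) init)[p]? = init[p]? := by
  induction l with
  | nil => intro init; rfl
  | cons hd tl ih =>
    intro init
    simp only [List.map_cons, List.mem_cons, not_or] at hp
    rw [List.foldl_cons, ih (by exact hp.2), List.getElem?_set, if_neg (fun he => hp.1 he.symm)]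

theorem pvFoldl_set_mem (l : List (Nat × Int)) (hnd : (l.map Prod.fst).Nodup) (p : Nat) (v : Int)
    (hm : (p, v) ∈ l) :
    ∀ init : List Int, p < init.length →
      (l.foldl (fun o pq => o.set pq.1 pq.2) init)[p]? = some v := by
  induction l with
  | nil => intro init _; simp at hm
  | cons hd tl ih =>
    intro init hlen
    simp only [List.map_cons, List.nodup_cons] at hnd
    rw [List.foldl_cons]
    rcases List.mem_cons.mp hm with he | hm'
    · have hp : p ∉ tl.map Prod.fst := by rw [← he] at hnd; exact hnd.1
      rw [pvFoldl_set_not_mem tl p hp, ← he, List.getElem?_set, if_pos rfl,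
        if_pos (by simpa [← he] using hlen)]
    · exact ih hnd.2 hm' _ (by simpa using hlen)

theorem pvExtract (nums : List Int) (a : List (Int × Int)) (pos : List Int) (h : pvInv nums a pos) :
    a.map (fun p => p.2) =
      (PySem.List.pyRange 0 (nums.length : Int) 1).foldl
        (fun out i => PySem.List.pySetD out (PySem.List.pyGetD pos i 0) (PySem.List.pyGetD nums i 0))
        (List.replicate nums.length 0) := by
  obtain ⟨P, hla, hlp, hP⟩ := h
  have hinj : ∀ j1 j2, j1 < nums.length → j2 < nums.length → P j1 = P j2 → j1 = j2 := by
    intro j1 j2 h1 h2 he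
    have a1 := (hP j1 h1).2.2
    have a2 := (hP j2 h2).2.2
    rw [he, a2] at a1
    have : ((j2 : Nat) : Int) = ((j1 : Nat) : Int) := by
      simpa using congrArg (fun o => (o.map Prod.fst)) a1
    exact (by exact_mod_cast this : j2 = j1).symm
  have hsurj := pvSurj nums.length P (fun j hj => (hP j hj).1) hinj
  -- turn the scatter loop into a fold of plain sets over the pair list
  have hscat : (PySem.List.pyRange 0 (nums.length : Int) 1).foldl
      (fun out i => PySem.List.pySetD out (PySem.List.pyGetD pos i 0) (PySem.List.pyGetD nums i 0))
      (List.replicate nums.length 0)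
      = ((List.range nums.length).map (fun n => (P n, nums.getD n 0))).foldl
          (fun o pq => o.set pq.1 pq.2) (List.replicate nums.length 0) := by
    rw [PySem.List.pyRange_one, List.foldl_map, List.foldl_map]
    simp only [Int.sub_zero, Int.toNat_natCast, Int.zero_add]
    apply PySem.List.foldl_congr_mem
    intro acc n hn
    have hn' : n < nums.length := List.mem_range.mp hn
    obtain ⟨_, hposn, _⟩ := hP n hn'
    rw [PySem.List.pyGetD_natCast, PySem.List.pyGetD_natCast,
      List.getD_eq_getElem?_getD, hposn]
    simp [PySem.List.pySetD_natCast]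
  rw [hscat]
  apply List.ext_getElem?
  intro q
  have hndp : (((List.range nums.length).map (fun n => (P n, nums.getD n 0))).map Prod.fst).Nodup := by
    rw [List.map_map]
    exact List.Nodup.map_on
      (fun x hx y hy he => hinj x y (List.mem_range.mp hx) (List.mem_range.mp hy) he)
      (List.nodup_range)
  by_cases hq : q < nums.length
  · obtain ⟨n, hn, hPn⟩ := hsurj q hq
    obtain ⟨_, _, han⟩ := hP n hn
    rw [hPn] at han
    rw [List.getElem?_map, han]
    rw [pvFoldl_set_mem _ hndp q (nums.getD n 0)
      (List.mem_map.mpr ⟨n, List.mem_range.mpr hn, by rw [hPn]⟩)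
      _ (by simpa using hq)]
    rfl
  · rw [List.getElem?_eq_none (by simpa [hla] using not_lt.mp hq),
      List.getElem?_eq_none (by rw [pvFoldl_set_length]; simpa using not_lt.mp hq)]

-- ===== VERDICT (by name: the statement is the Claim_ definition above) =====
theorem mix_numbers_spec : Claim_equal_mix_numbers := by
  intro nums reps _ hpre
  unfold Spec_mix_numbers mix_numbers mix_numbers_alt
  have hInv : pvInv nums
      ((PySem.List.pyRange 0 reps 1).foldl
        (fun a _ => (PySem.List.enumerate nums).foldl (pvStepA (nums.length : Int)) a)
        (PySem.List.enumerate nums))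
      ((PySem.List.pyRange 0 reps 1).foldl
        (fun pos _ => (PySem.List.pyRange 0 (nums.length : Int) 1).foldl (pvStepB nums) pos)
        (PySem.List.pyRange 0 (nums.length : Int) 1)) := by
    apply pvFoldl_rel (pvInv nums) _ _ _ _ _ (pvInv_init nums)
    intro c hc a pos h
    by_cases hk : nums.length = 1
    · exfalso
      have hr : 1 ≤ reps := by
        by_contra hr
        have : PySem.List.pyRange 0 reps 1 = [] := PySem.List.pyRange_one_eq_nil (by omega)
        simp [this] at hc
      exact hpre ⟨hk, hr⟩
    · exact pvPass_preserves nums hk a pos h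
  exact pvExtract nums _ _ hInv
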